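-- pv_equiv track=rewrite | github.com/yandex/yatool | devtools/ya/jbuild/gen/actions/parse.py | extract_chunks
-- ===== SOURCE A (Python) =====
-- import collections
--
-- def extract_chunks(words, keys):
--     kv = collections.defaultdict(list)
--
--     k = None
--     cur = []
--
--     for w in words:
--         if w in keys:
--             kv[k].append(cur)
--             cur = []
--             k = w
--
--         else:
--             cur.append(w)
--
--     kv[k].append(cur)
--
--     return kv
-- ===== SOURCE B (Python) =====
-- import collections
--
-- def extract_chunks(words, keys):
--     kv = collections.defaultdict(list)
--
--     bounds = [(i, w) for i, w in enumerate(words) if w in keys]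
--
--     prev = 0
--     k = None
--
--     for i, w in bounds:
--         kv[k].append(words[prev:i])
--         k = w
--         prev = i + 1
--
--     kv[k].append(words[prev:])
--
--     return kv
-- ===== Notes on version B (the rewrite author's own statement) =====
-- stated objective: alternative
-- what changed: B first builds the list of delimiter boundaries via enumerate+filter and then fills the defaultdict by slicing words between consecutive boundaries, instead of A's single accumulator loop that grows the current chunk word by word.
import Mathlib
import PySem

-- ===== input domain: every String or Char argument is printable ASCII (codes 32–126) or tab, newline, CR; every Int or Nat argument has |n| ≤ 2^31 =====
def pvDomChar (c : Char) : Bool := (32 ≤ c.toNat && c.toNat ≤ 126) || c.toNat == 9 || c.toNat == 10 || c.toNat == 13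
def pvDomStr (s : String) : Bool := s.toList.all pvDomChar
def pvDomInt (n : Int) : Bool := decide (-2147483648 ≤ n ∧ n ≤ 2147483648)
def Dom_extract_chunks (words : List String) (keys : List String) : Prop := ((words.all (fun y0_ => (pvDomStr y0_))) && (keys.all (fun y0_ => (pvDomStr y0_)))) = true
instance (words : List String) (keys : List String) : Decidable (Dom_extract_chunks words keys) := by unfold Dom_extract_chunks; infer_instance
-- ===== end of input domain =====

-- B builds the boundary list first and slices between boundaries; same result, different decomposition (objective: alternative).
-- ===== PORT A =====
-- kv[k].append(c) on a collections.defaultdict(list): insert [] if k is absent, then append c.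
def pvApp (kv : PySem.Dict (Option String) (List (List String))) (k : Option String)
    (c : List String) : PySem.Dict (Option String) (List (List String)) :=
  kv.modify k [] (· ++ [c])

def extract_chunks (words : List String) (keys : List String) : List (Option String × List (List String)) :=
  let st := words.foldl
    (fun (st : PySem.Dict (Option String) (List (List String)) × Option String × List String) w =>
      if keys.contains w then (pvApp st.1 st.2.1 st.2.2, some w, ([] : List String))
      else (st.1, st.2.1, st.2.2 ++ [w]))
    (PySem.Dict.empty, none, [])
  (pvApp st.1 st.2.1 st.2.2).items

-- ===== PORT B =====
def extract_chunks_alt (words : List String) (keys : List String) : List (Option String × List (List String)) :=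
  let bounds := (PySem.List.enumerate words).filter (fun p => keys.contains p.2)
  let st := bounds.foldl
    (fun (st : PySem.Dict (Option String) (List (List String)) × Option String × Int) p =>
      (pvApp st.1 st.2.1 (PySem.List.slice words (some st.2.2) (some p.1)), some p.2, p.1 + 1))
    (PySem.Dict.empty, none, 0)
  (pvApp st.1 st.2.1 (PySem.List.slice words (some st.2.2) none)).items

-- ===== PRECONDITION & SPEC =====
def Spec_extract_chunks (words : List String) (keys : List String) (out : List (Option String × List (List String))) : Prop := out = extract_chunks_alt words keys
instance (words : List String) (keys : List String) (out : List (Option String × List (List String))) : Decidable (Spec_extract_chunks words keys out) := by unfold Spec_extract_chunks; infer_instance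

-- ===== CLAIM (what is proved, stated in full; the proofs are below) =====
def Claim_equal_extract_chunks : Prop := ∀ (words : List String) (keys : List String), Dom_extract_chunks words keys → Spec_extract_chunks words keys (extract_chunks words keys)

-- ===== LEMMAS AND PROOFS =====

-- ===== VERDICT (by name: the statement is the Claim_ definition above) =====
-- the sequence of kv[k].append(chunk) operations both programs perform, in order
def pvOps (keys : List String) : List String → Option String → List String → List (Option String × List String)
  | [], k, cur => [(k, cur)]
  | w :: t, k, cur =>
      if keys.contains w then (k, cur) :: pvOps keys t (some w) []
      else pvOps keys t k (cur ++ [w])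

theorem pvLemA (keys : List String) (ws : List String) (kv : PySem.Dict (Option String) (List (List String)))
    (k : Option String) (cur : List String) :
    (let st := ws.foldl
      (fun (st : PySem.Dict (Option String) (List (List String)) × Option String × List String) w =>
        if keys.contains w then (pvApp st.1 st.2.1 st.2.2, some w, ([] : List String))
        else (st.1, st.2.1, st.2.2 ++ [w]))
      (kv, k, cur)
     (pvApp st.1 st.2.1 st.2.2))
    = (pvOps keys ws k cur).foldl (fun d p => pvApp d p.1 p.2) kv := by
  induction ws generalizing kv k cur with
  | nil => simp [pvOps]
  | cons w t ih =>
      by_cases h : keys.contains w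
      · simp only [List.foldl_cons, pvOps, h, if_pos]
        exact ih (pvApp kv k cur) (some w) []
      · simp only [List.foldl_cons, pvOps, h, ite_false, Bool.false_eq_true]
        exact ih kv k (cur ++ [w])

theorem pvTakeSnoc (l : List String) (n : Nat) (w : String) (t : List String) (h : l.drop n = w :: t) :
    l.take n ++ [w] = l.take (n + 1) := by
  have h0 : l[n]? = some w := by
    have h2 := congrArg (fun xs : List String => xs[0]?) h
    simpa using h2
  rw [List.take_add_one, h0]
  rfl

theorem pvLemB (words keys ws : List String) (p prev : Nat) (hws : ws = words.drop p) (hle : prev ≤ p)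
    (kv : PySem.Dict (Option String) (List (List String))) (k : Option String) :
    (let st := ((PySem.List.enumerate ws (p : Int)).filter (fun q => keys.contains q.2)).foldl
      (fun (st : PySem.Dict (Option String) (List (List String)) × Option String × Int) q =>
        (pvApp st.1 st.2.1 (PySem.List.slice words (some st.2.2) (some q.1)), some q.2, q.1 + 1))
      (kv, k, (prev : Int))
     (pvApp st.1 st.2.1 (PySem.List.slice words (some st.2.2) none)))
    = (pvOps keys ws k ((words.drop prev).take (p - prev))).foldl (fun d q => pvApp d q.1 q.2) kv := by
  induction ws generalizing p prev kv k with
  | nil =>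
      simp only [PySem.List.enumerate_nil, List.filter_nil, List.foldl_nil, pvOps, List.foldl_cons]
      rw [PySem.List.slice_from_natCast]
      have hlen : words.length ≤ p := List.drop_eq_nil_iff.mp hws.symm
      rw [List.take_of_length_le (by simp; omega)]
  | cons w t ih =>
      have hw' : t = words.drop (p + 1) := by
        have h1 : List.drop 1 (List.drop p words) = t := by rw [← hws]; rfl
        rw [List.drop_drop] at h1
        simpa [Nat.add_comm] using h1.symm
      have hcast : ((p : Int) + 1) = ((p + 1 : Nat) : Int) := by push_cast; ring
      rw [PySem.List.enumerate_cons]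
      simp only [hcast]
      by_cases h : keys.contains w
      · simp only [List.filter_cons, h, if_pos, List.foldl_cons, pvOps]
        have hih := ih (p + 1) (p + 1) hw' (le_refl _)
          (pvApp kv k (PySem.List.slice words (some (prev : Int)) (some (p : Int)))) (some w)
        simp only at hih
        rw [hcast, hih]
        simp only [Nat.sub_self, List.take_zero, PySem.List.slice_natCast]
      · simp only [List.filter_cons, h, Bool.false_eq_true, if_neg, not_false_iff, pvOps]
        have hih := ih (p + 1) prev hw' (by omega) kv k
        simp only at hih
        rw [hih]
        have hdrop : (words.drop prev).drop (p - prev) = w :: t := by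
          rw [List.drop_drop]
          have hpp : prev + (p - prev) = p := by omega
          rw [hpp, ← hws]
        have hsnoc := pvTakeSnoc (words.drop prev) (p - prev) w t hdrop
        have harith : p - prev + 1 = p + 1 - prev := by omega
        rw [harith] at hsnoc
        rw [hsnoc]

theorem extract_chunks_spec : Claim_equal_extract_chunks := by
  intro words keys _
  show extract_chunks words keys = extract_chunks_alt words keys
  unfold extract_chunks extract_chunks_alt
  dsimp only
  have ha := pvLemA keys words PySem.Dict.empty none []
  have hb := pvLemB words keys words 0 0 rfl (le_refl 0) PySem.Dict.empty none
  simp only at ha hb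
  simp only [List.drop_zero, Nat.sub_self, List.take_zero, Nat.cast_zero] at hb
  rw [ha, hb]
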